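-- pv_equiv track=rewrite | github.com/facebookresearch/diplomacy_cicero | parlai_diplomacy/utils/game2seq/format_helpers/misc.py | uncorrupt_ampersands
-- ===== SOURCE A (Python) =====
-- AMPERSAND_REPLACEMENTS = [
--     ("don&t", "don't"),
--     ("can&t", "can't"),
--     ("it&s", "it's"),
--     ("I&m", "I'm"),
--     ("didn&t", "didn't"),
--     ("won&t", "won't"),
--     ("&sigh&", "*sigh*"),
--     ("I&ll", "I'll"),
--     ("&not&", "*not*"),
--     ("&and&", "*and*"),
--     ("doesn&t", "doesn't"),
--     ("let&s", "let's"),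
--     ("isn&t", "isn't"),
--     ("&edit&", "*edit*"),
--     ("It&s", "It's"),
--     ("i&ll", "i'll"),
--     ("that&s", "that's"),
--     ("&you&", "*you*"),
--     ("Let&s", "Let's"),
--     ("i&m", "i'm"),
--     ("Don&t", "Don't"),
--     ("&really&", "*really*"),
--     ("&I&", "*I*"),
--     ("&think&", "*think*"),
--     ("&shrug&", "*shrug*"),
--     ("That&s", "That's"),
--     ("&will&", "*will*"),
--     ("&is&", "*is*"),
--     ("&could&", "*could*"),
--     ("&might&", "*might*"),
--     ("haven&t", "haven't"),
--     ("&cough&", "*cough*"),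
--     ("I&d", "I'd"),
--     ("&very&", "*very*"),
--     ("&me&", "*me*"),
--     ("wasn&t", "wasn't"),
--     ("what&s", "what's"),
--     ("&that&", "*that*"),
--     ("&should&", "*should*"),
--     ("wouldn&t", "wouldn't"),
--     ("you&re", "you're"),
--     ("&do&", "*do*"),
--     ("&can&", "*can*"),
--     ("you&ll", "you'll"),
--     ("I&ve", "I've"),
--     ("&need&", "*need*"),
--     ("&shrugs&", "*shrugs*"),
--     ("aren&t", "aren't"),
--     ("&both&", "*both*"),
--     ("we&ll", "we'll"),
--     ("he&s", "he's"),
--     ("&if&", "*if*"),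
--     ("&facepalm&", "*facepalm*"),
--     ("&much&", "*much*"),
--     ("&grins&", "*grins*"),
--     ("&all&", "*all*"),
--     ("&too&", "*too*"),
--     ("&only&", "*only*"),
--     ("&never&", "*never*"),
--     ("&any&", "*any*"),
-- ]
--
-- def uncorrupt_ampersands(msg_txt: str) -> str:
--     """
--     Uncorrupt certain tokens with ampersands
--
--     We replace the top 60 most frequently appearing tokens with ampersand and an obvious replacement
--     """
--     if "&" not in msg_txt:
--         # fail fast here
--         return msg_txt
--
--     replace_dct = {k: v for k, v in AMPERSAND_REPLACEMENTS}
--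
--     split_msg = msg_txt.split(" ")
--     for i in range(len(split_msg)):
--         if split_msg[i] in replace_dct:
--             split_msg[i] = replace_dct[split_msg[i]]
--
--     return " ".join(split_msg)
-- ===== SOURCE B (Python) =====
-- # B: single streaming character pass; only the 60 corrupted tokens are stored,
-- # their fixed forms are DERIVED ('&'->'*' for *emphasis* tokens, '&'->"'" for
-- # contractions) instead of being looked up in a key->value dict.
-- _AMP_TOKENS = frozenset([
--     "don&t", "can&t", "it&s", "I&m", "didn&t", "won&t", "&sigh&", "I&ll",
--     "&not&", "&and&", "doesn&t", "let&s", "isn&t", "&edit&", "It&s", "i&ll",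
--     "that&s", "&you&", "Let&s", "i&m", "Don&t", "&really&", "&I&", "&think&",
--     "&shrug&", "That&s", "&will&", "&is&", "&could&", "&might&", "haven&t",
--     "&cough&", "I&d", "&very&", "&me&", "wasn&t", "what&s", "&that&",
--     "&should&", "wouldn&t", "you&re", "&do&", "&can&", "you&ll", "I&ve",
--     "&need&", "&shrugs&", "aren&t", "&both&", "we&ll", "he&s", "&if&",
--     "&facepalm&", "&much&", "&grins&", "&all&", "&too&", "&only&", "&never&",
--     "&any&",
-- ])
--
--
-- def _fix(tok):
--     # the corrupted tokens decode uniformly: '&...&' emphasis -> '*', else contraction -> "'"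
--     if tok.startswith("&") and tok.endswith("&"):
--         return tok.replace("&", "*")
--     return tok.replace("&", "'")
--
--
-- def uncorrupt_ampersands(msg_txt: str) -> str:
--     # one streaming pass: accumulate the current space-delimited token,
--     # emit it (decoded if corrupted) at each token boundary
--     parts = []
--     tok = []
--     for ch in msg_txt:
--         if ch == " ":
--             t = "".join(tok)
--             parts.append(_fix(t) if t in _AMP_TOKENS else t)
--             parts.append(" ")
--             tok = []
--         else:
--             tok.append(ch)
--     t = "".join(tok)
--     parts.append(_fix(t) if t in _AMP_TOKENS else t)
--     return "".join(parts)
-- ===== Notes on version B (the rewrite author's own statement) =====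
-- stated objective: alternative
-- what changed: Replaces A's split-on-space / key->value dict lookup / rejoin pipeline (with a '&'-membership fast path) by a single streaming character pass that emits each token at its boundary, and stores only the 60 corrupted tokens as a set, deriving the fixed form ('&'->'*' for *emphasis* tokens, '&'->apostrophe for contractions) instead of looking up a stored replacement value.
import Mathlib
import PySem

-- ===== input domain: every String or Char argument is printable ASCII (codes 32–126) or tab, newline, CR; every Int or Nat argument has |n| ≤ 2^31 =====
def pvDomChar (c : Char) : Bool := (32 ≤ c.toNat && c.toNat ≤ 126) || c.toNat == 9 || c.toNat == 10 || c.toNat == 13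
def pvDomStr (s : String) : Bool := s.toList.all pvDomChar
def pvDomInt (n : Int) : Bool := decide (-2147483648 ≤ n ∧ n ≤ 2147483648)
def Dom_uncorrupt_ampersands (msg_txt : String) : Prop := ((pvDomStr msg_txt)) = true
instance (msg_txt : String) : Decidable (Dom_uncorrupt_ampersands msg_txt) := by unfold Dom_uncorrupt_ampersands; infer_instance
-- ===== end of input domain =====

-- B replaces A's split-on-space / key->value dict lookup / rejoin pipeline by a single streaming
-- character scan over a key SET, deriving each fixed token ('&'->'*' or '&'->''') instead of
-- storing replacement values (objective: alternative).

-- ===== PORT A =====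
def ampersandReplacements : List (String × String) := [
    ("don&t", "don't"), ("can&t", "can't"), ("it&s", "it's"), ("I&m", "I'm"),
    ("didn&t", "didn't"), ("won&t", "won't"), ("&sigh&", "*sigh*"), ("I&ll", "I'll"),
    ("&not&", "*not*"), ("&and&", "*and*"), ("doesn&t", "doesn't"), ("let&s", "let's"),
    ("isn&t", "isn't"), ("&edit&", "*edit*"), ("It&s", "It's"), ("i&ll", "i'll"),
    ("that&s", "that's"), ("&you&", "*you*"), ("Let&s", "Let's"), ("i&m", "i'm"),
    ("Don&t", "Don't"), ("&really&", "*really*"), ("&I&", "*I*"), ("&think&", "*think*"),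
    ("&shrug&", "*shrug*"), ("That&s", "That's"), ("&will&", "*will*"), ("&is&", "*is*"),
    ("&could&", "*could*"), ("&might&", "*might*"), ("haven&t", "haven't"),
    ("&cough&", "*cough*"), ("I&d", "I'd"), ("&very&", "*very*"), ("&me&", "*me*"),
    ("wasn&t", "wasn't"), ("what&s", "what's"), ("&that&", "*that*"),
    ("&should&", "*should*"), ("wouldn&t", "wouldn't"), ("you&re", "you're"),
    ("&do&", "*do*"), ("&can&", "*can*"), ("you&ll", "you'll"), ("I&ve", "I've"),
    ("&need&", "*need*"), ("&shrugs&", "*shrugs*"), ("aren&t", "aren't"),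
    ("&both&", "*both*"), ("we&ll", "we'll"), ("he&s", "he's"), ("&if&", "*if*"),
    ("&facepalm&", "*facepalm*"), ("&much&", "*much*"), ("&grins&", "*grins*"),
    ("&all&", "*all*"), ("&too&", "*too*"), ("&only&", "*only*"), ("&never&", "*never*"),
    ("&any&", "*any*")]

def uncorrupt_ampersands (msg_txt : String) : String :=
  if PySem.Str.isIn "&" msg_txt = false then
    -- fail fast here
    msg_txt
  else
    let replace_dct : PySem.Dict (List Char) (List Char) :=
      ampersandReplacements.foldl (fun d p => d.insert p.1.toList p.2.toList) PySem.Dict.empty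
    let split_msg := PySem.Chars.splitOn msg_txt.toList " ".toList
    let split_msg := split_msg.foldl (fun acc w =>
      acc ++ [if replace_dct.contains w then replace_dct.getD w w else w]) []
    String.ofList (PySem.Chars.join " ".toList split_msg)

-- ===== PORT B =====
-- Source B's module-level _AMP_TOKENS: the frozenset of the 60 corrupted tokens (no values stored)
def bAmpTokens : PySem.Set (List Char) :=
  PySem.Set.ofList ([
    "don&t", "can&t", "it&s", "I&m", "didn&t", "won&t", "&sigh&", "I&ll",
    "&not&", "&and&", "doesn&t", "let&s", "isn&t", "&edit&", "It&s", "i&ll",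
    "that&s", "&you&", "Let&s", "i&m", "Don&t", "&really&", "&I&", "&think&",
    "&shrug&", "That&s", "&will&", "&is&", "&could&", "&might&", "haven&t",
    "&cough&", "I&d", "&very&", "&me&", "wasn&t", "what&s", "&that&",
    "&should&", "wouldn&t", "you&re", "&do&", "&can&", "you&ll", "I&ve",
    "&need&", "&shrugs&", "aren&t", "&both&", "we&ll", "he&s", "&if&",
    "&facepalm&", "&much&", "&grins&", "&all&", "&too&", "&only&", "&never&",
    "&any&"].map String.toList)

-- Source B's _fix: derive the fixed form of a corrupted token
def bFix (tok : List Char) : List Char :=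
  if PySem.Chars.startswith tok ['&'] && PySem.Chars.endswith tok ['&'] then
    PySem.Chars.replace tok ['&'] ['*']
  else
    PySem.Chars.replace tok ['&'] ['\'']

-- Source B's `_fix(t) if t in _AMP_TOKENS else t`
def bEmit (tok : List Char) : List Char :=
  if PySem.Set.contains bAmpTokens tok then bFix tok else tok

-- the streaming loop of Source B: `tok` is the current token, emit at each " " and at the end
def bGo : List Char → List Char → List Char
  | tok, [] => bEmit tok
  | tok, c :: rest =>
      if c = ' ' then bEmit tok ++ ' ' :: bGo [] rest
      else bGo (tok ++ [c]) rest

def uncorrupt_ampersands_alt (msg_txt : String) : String :=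
  String.ofList (bGo [] msg_txt.toList)

-- ===== PRECONDITION & SPEC =====
def Spec_uncorrupt_ampersands (msg_txt : String) (out : String) : Prop := out = uncorrupt_ampersands_alt msg_txt
instance (msg_txt : String) (out : String) : Decidable (Spec_uncorrupt_ampersands msg_txt out) := by unfold Spec_uncorrupt_ampersands; infer_instance

-- ===== CLAIM (what is proved, stated in full; the proofs are below) =====
def Claim_equal_uncorrupt_ampersands : Prop := ∀ (msg_txt : String), Dom_uncorrupt_ampersands msg_txt → Spec_uncorrupt_ampersands msg_txt (uncorrupt_ampersands msg_txt)

-- ===== LEMMAS AND PROOFS =====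

-- A's dict, as a named helper for the proofs
def aDict : PySem.Dict (List Char) (List Char) :=
  ampersandReplacements.foldl (fun d p => d.insert p.1.toList p.2.toList) PySem.Dict.empty

-- reference splitter: what `splitOn cs [' ']` computes, in structural form
def splitSp : List Char → List (List Char)
  | [] => [[]]
  | c :: rest => if c = ' ' then [] :: splitSp rest else (splitSp rest).modifyHead (c :: ·)

theorem splitSp_ne_nil (cs : List Char) : splitSp cs ≠ [] := by
  cases cs with
  | nil => simp [splitSp]
  | cons c rest =>
      simp only [splitSp]
      split_ifs
      · simp
      · intro h
        have := splitSp_ne_nil rest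
        cases hs : splitSp rest with
        | nil => exact this hs
        | cons t ts => rw [hs] at h; simp at h

theorem modifyHead_idfun (l : List (List Char)) : List.modifyHead (fun x => x) l = l := by
  cases l <;> simp

theorem go_char (fuel : Nat) (l cur : List Char) (accs : List (List Char))
    (h : l.length < fuel) :
    PySem.Chars.splitOn.go [' '] fuel l cur accs =
      accs.reverse ++ (splitSp l).modifyHead (cur.reverse ++ ·) := by
  induction fuel generalizing l cur accs with
  | zero => omega
  | succ f ih =>
      cases l with
      | nil => simp [PySem.Chars.splitOn.go, splitSp]
      | cons c rest =>
          by_cases hc : c = ' '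
          · subst hc
            have hpre : List.isPrefixOf [' '] (' ' :: rest) = true := by
              simp [List.isPrefixOf]
            simp only [PySem.Chars.splitOn.go, hpre, if_true, List.length_cons,
              List.drop_succ_cons, List.drop_zero, List.length_nil]
            rw [ih rest [] (cur.reverse :: accs) (by simpa using Nat.lt_of_succ_lt_succ h)]
            simp [splitSp, modifyHead_idfun]
          · have hpre : List.isPrefixOf [' '] (c :: rest) = false := by
              simp [List.isPrefixOf, BEq.beq]
              intro hh; exact hc hh.symm
            simp only [PySem.Chars.splitOn.go, hpre]
            rw [ih rest (c :: cur) accs (by simpa using Nat.lt_of_succ_lt_succ h)]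
            simp [splitSp, hc, List.modifyHead_modifyHead, Function.comp_def]

theorem splitOn_eq (cs : List Char) : PySem.Chars.splitOn cs [' '] = splitSp cs := by
  unfold PySem.Chars.splitOn
  rw [go_char _ _ _ _ (by omega)]
  simp [modifyHead_idfun]

theorem splitSp_no_space (t : List Char) (h : ' ' ∉ t) : splitSp t = [t] := by
  induction t with
  | nil => rfl
  | cons c rest ih =>
      have hc : c ≠ ' ' := by intro hc; exact h (by simp [hc])
      have hr : ' ' ∉ rest := fun hm => h (by simp [hm])
      simp [splitSp, hc, ih hr]

theorem splitSp_append (t rest : List Char) (h : ' ' ∉ t) :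
    splitSp (t ++ ' ' :: rest) = t :: splitSp rest := by
  induction t with
  | nil => simp [splitSp]
  | cons c t' ih =>
      have hc : c ≠ ' ' := by intro hc; exact h (by simp [hc])
      have hr : ' ' ∉ t' := fun hm => h (by simp [hm])
      simp [splitSp, hc, ih hr]

-- the two programs' per-token fixes agree: on the 60 keys A's stored value is B's derived one
set_option maxRecDepth 40000 in
theorem key_facts : ∀ k ∈ bAmpTokens, aDict.contains k = true ∧ aDict.getD k k = bFix k := by
  decide

set_option maxRecDepth 40000 in
theorem keys_eq : aDict.keys = bAmpTokens := by decide

set_option maxRecDepth 40000 in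
theorem keys_amp : ∀ k ∈ bAmpTokens, '&' ∈ k := by decide

theorem set_contains_false (t : List Char) (h : t ∉ bAmpTokens) :
    PySem.Set.contains bAmpTokens t = false := by
  rw [Bool.eq_false_iff]
  intro hc
  exact h ((PySem.Set.contains_iff bAmpTokens t).mp hc)

theorem emit_eq (t : List Char) :
    (if aDict.contains t then aDict.getD t t else t) = bEmit t := by
  by_cases hm : t ∈ bAmpTokens
  · have h := key_facts t hm
    have hs : PySem.Set.contains bAmpTokens t = true :=
      (PySem.Set.contains_iff bAmpTokens t).mpr hm
    simp only [bEmit, h.1, hs, if_true]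
    exact h.2
  · have hc : aDict.contains t = false := by
      rw [Bool.eq_false_iff]
      intro h
      exact hm (keys_eq ▸ (PySem.Dict.contains_iff_mem_keys aDict t).mp h)
    simp only [bEmit, hc, set_contains_false t hm, Bool.false_eq_true, if_false]

theorem emit_no_amp (t : List Char) (h : '&' ∉ t) : bEmit t = t := by
  have hm : t ∉ bAmpTokens := fun hm => h (keys_amp t hm)
  simp only [bEmit, set_contains_false t hm, Bool.false_eq_true, if_false]

theorem bGo_eq (cs : List Char) : ∀ tok : List Char, ' ' ∉ tok →
    bGo tok cs = PySem.Chars.join [' '] ((splitSp (tok ++ cs)).map bEmit) := by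
  induction cs with
  | nil =>
      intro tok ht
      simp [bGo, splitSp_no_space tok ht, PySem.Chars.join_singleton]
  | cons c rest ih =>
      intro tok ht
      by_cases hc : c = ' '
      · subst hc
        rw [splitSp_append tok rest ht]
        cases hs : splitSp rest with
        | nil => exact absurd hs (splitSp_ne_nil rest)
        | cons t ts =>
            simp only [bGo, List.map_cons, PySem.Chars.join_cons_cons]
            rw [ih [] (by simp)]
            simp [hs]
      · have ht' : ' ' ∉ tok ++ [c] := by
          intro hm; rcases List.mem_append.mp hm with h1 | h1
          · exact ht h1
          · simp at h1; exact hc h1.symm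
        have : tok ++ c :: rest = (tok ++ [c]) ++ rest := by simp
        rw [this, ← ih (tok ++ [c]) ht']
        simp [bGo, hc]

theorem bGo_no_amp (cs : List Char) : ∀ tok : List Char, '&' ∉ tok → '&' ∉ cs →
    bGo tok cs = tok ++ cs := by
  induction cs with
  | nil => intro tok ht _; simp [bGo, emit_no_amp tok ht]
  | cons c rest ih =>
      intro tok ht hcs
      have hc : c ≠ '&' := by intro hc; exact hcs (by simp [hc])
      have hr : '&' ∉ rest := fun hm => hcs (by simp [hm])
      by_cases hsp : c = ' '
      · subst hsp
        simp [bGo, emit_no_amp tok ht, ih [] (by simp) hr]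
      · have h2 : '&' ∉ tok ++ [c] := by
          intro hm; rcases List.mem_append.mp hm with h1 | h1
          · exact ht h1
          · simp at h1; exact hc h1.symm
        simp [bGo, hsp, ih (tok ++ [c]) h2 hr]

-- ===== VERDICT (by name: the statement is the Claim_ definition above) =====
theorem uncorrupt_ampersands_spec : Claim_equal_uncorrupt_ampersands := by
  intro msg _
  unfold Spec_uncorrupt_ampersands uncorrupt_ampersands uncorrupt_ampersands_alt
  by_cases hamp : PySem.Str.isIn "&" msg = false
  · have hmem : '&' ∉ msg.toList := by
      intro hm
      have : PySem.Str.isIn "&" msg = true :=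
        (PySem.Str.isIn_iff_infix "&" msg).mpr
          (by simpa using (List.singleton_infix_iff '&' msg.toList).mpr hm)
      rw [this] at hamp; exact absurd hamp (by simp)
    rw [if_pos hamp, bGo_no_amp msg.toList [] (by simp) hmem]
    simp [String.ofList_toList]
  · rw [if_neg hamp]
    have hsep : " ".toList = [' '] := rfl
    have hfold : ∀ l : List (List Char),
        (l.foldl (fun acc w =>
          acc ++ [if aDict.contains w then aDict.getD w w else w]) []) =
          l.map bEmit := by
      intro l
      rw [PySem.List.foldl_append_singleton_eq_map
        (fun w => if aDict.contains w then aDict.getD w w else w) l []]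
      simp [emit_eq]
    show String.ofList (PySem.Chars.join " ".toList _) = _
    rw [hsep, splitOn_eq]
    rw [show (ampersandReplacements.foldl
          (fun d p => d.insert p.1.toList p.2.toList) PySem.Dict.empty) = aDict from rfl]
    rw [hfold, bGo_eq msg.toList [] (by simp)]
    simp
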